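-- pv_equiv track=rewrite | github.com/raw-labs/mxcp | examples/squirro/python/squirro_search.py | _choose_best_file
-- ===== SOURCE A (Python) =====
-- from typing import Optional, List, Dict, Any
--
-- def _choose_best_file(files: List[Dict[str, Any]]) -> tuple[Optional[str], Optional[str], str]:
--     """
--     Select the best file representation from available files.
--
--     Prefers: 1) PDF conversions, 2) Original DOCX, 3) First available file with link.
--
--     Args:
--         files: List of file dictionaries from Squirro item
--
--     Returns:
--         Tuple of (mime_type, link, filename_hint)
--     """
--     # Prefer converted PDF
--     pdf = next(
--         (f for f in files if f.get("mime_type") == "application/pdf" and f.get("link")), None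
--     )
--     if pdf:
--         return pdf["mime_type"], pdf["link"], _filename_hint(pdf)
--
--     # Then original DOCX
--     docx = next(
--         (
--             f
--             for f in files
--             if f.get("mime_type")
--             == "application/vnd.openxmlformats-officedocument.wordprocessingml.document"
--             and f.get("link")
--         ),
--         None,
--     )
--     if docx:
--         return docx["mime_type"], docx["link"], _filename_hint(docx)
--
--     # Fallback to any file with a link
--     other = next((f for f in files if f.get("link")), None)
--     if other:
--         return other.get("mime_type"), other["link"], _filename_hint(other)
--
--     return None, None, "unknown"
--
-- def _filename_hint(file_dict: Dict[str, Any]) -> str: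
--     """Extract filename from file dictionary."""
--     return file_dict.get("filename") or file_dict.get("name") or file_dict.get("title") or "file"
-- ===== SOURCE B (Python) =====
-- from typing import Optional, List, Dict, Any
--
-- _DOCX = "application/vnd.openxmlformats-officedocument.wordprocessingml.document"
--
--
-- def _filename_hint(file_dict: Dict[str, Any]) -> str:
--     """Extract filename from file dictionary."""
--     return file_dict.get("filename") or file_dict.get("name") or file_dict.get("title") or "file"
--
--
-- def _choose_best_file(files: List[Dict[str, Any]]) -> tuple[Optional[str], Optional[str], str]:
--     """Single pass: return the first linked PDF immediately; otherwise remember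
--     the first linked DOCX and the first other linked file as candidates."""
--     docx = None
--     other = None
--     for f in files:
--         if not f.get("link"):
--             continue
--         mt = f.get("mime_type")
--         if mt == "application/pdf":
--             return f["mime_type"], f["link"], _filename_hint(f)
--         if mt == _DOCX and docx is None:
--             docx = f
--         elif other is None:
--             other = f
--     if docx is not None:
--         return docx["mime_type"], docx["link"], _filename_hint(docx)
--     if other is not None:
--         return other.get("mime_type"), other["link"], _filename_hint(other)
--     return None, None, "unknown"
-- ===== Notes on version B (the rewrite author's own statement) =====
-- stated objective: alternative
-- what changed: Replaces A's three separate generator scans (PDF, then DOCX, then any-with-link) by one pass over the list that returns the first linked PDF immediately and otherwise maintains first-linked-DOCX and first-other-linked candidate slots resolved after the loop.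
import Mathlib
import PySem

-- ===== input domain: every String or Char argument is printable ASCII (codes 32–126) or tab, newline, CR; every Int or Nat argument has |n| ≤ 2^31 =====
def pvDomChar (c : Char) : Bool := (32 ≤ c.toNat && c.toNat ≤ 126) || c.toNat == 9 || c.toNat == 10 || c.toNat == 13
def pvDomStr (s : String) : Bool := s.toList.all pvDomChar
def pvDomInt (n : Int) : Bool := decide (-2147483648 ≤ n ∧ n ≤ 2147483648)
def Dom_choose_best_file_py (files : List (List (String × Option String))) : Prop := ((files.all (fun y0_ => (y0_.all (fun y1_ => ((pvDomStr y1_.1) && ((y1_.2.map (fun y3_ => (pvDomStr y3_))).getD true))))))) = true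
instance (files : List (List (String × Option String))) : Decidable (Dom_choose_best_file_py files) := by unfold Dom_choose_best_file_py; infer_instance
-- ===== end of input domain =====

-- B replaces A's three successive scans (PDF, DOCX, any-with-link) by a single pass
-- keeping first-DOCX / first-other candidate slots (objective: alternative, same cost).

-- ===== PORT A =====
-- d.get(k) on a dict[str, Optional[str]]: first matching key, Python None when absent
def pvGet (d : List (String × Option String)) (k : String) : Option String :=
  match d.find? (fun p => p.1 == k) with
  | some p => p.2
  | none => none

-- Python truthiness of an Optional[str] value: None and "" are falsy
def pvTruthy (v : Option String) : Bool :=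
  match v with
  | some s => !(s == "")
  | none => false

-- `x or y` on Optional[str] chains, final default a str
def pvOrStr (v : Option String) (w : String) : String :=
  match v with
  | some s => if s == "" then w else s
  | none => w

-- _filename_hint: get("filename") or get("name") or get("title") or "file"
def filename_hint (d : List (String × Option String)) : String :=
  pvOrStr (pvGet d "filename") (pvOrStr (pvGet d "name") (pvOrStr (pvGet d "title") "file"))

def pdfMime : String := "application/pdf"
def docxMime : String := "application/vnd.openxmlformats-officedocument.wordprocessingml.document"

-- the three generator predicates of A
def isPdf (f : List (String × Option String)) : Bool :=
  (pvGet f "mime_type" == some pdfMime) && pvTruthy (pvGet f "link")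
def isDocx (f : List (String × Option String)) : Bool :=
  (pvGet f "mime_type" == some docxMime) && pvTruthy (pvGet f "link")
def hasLink (f : List (String × Option String)) : Bool :=
  pvTruthy (pvGet f "link")

-- A: next(… pdf …) then next(… docx …) then next(… link …); `if pdf:` = found (a found
-- dict has a truthy "link" entry, hence is non-empty/truthy). Bracket access pdf["mime_type"],
-- pdf["link"] is ported as pvGet: at those points the key is guaranteed present.
def choose_best_file_py (files : List (List (String × Option String))) : Option String × Option String × String :=
  match files.find? isPdf with
  | some pdf => (pvGet pdf "mime_type", pvGet pdf "link", filename_hint pdf)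
  | none =>
    match files.find? isDocx with
    | some docx => (pvGet docx "mime_type", pvGet docx "link", filename_hint docx)
    | none =>
      match files.find? hasLink with
      | some other => (pvGet other "mime_type", pvGet other "link", filename_hint other)
      | none => (none, none, "unknown")

-- ===== PORT B =====
-- the for-loop of Source B: candidate slots `docx` and `other`, early return on a linked PDF
def chooseLoop (docx other : Option (List (String × Option String)))
    (files : List (List (String × Option String))) : Option String × Option String × String :=
  match files with
  | [] =>
    match docx with
    | some d => (pvGet d "mime_type", pvGet d "link", filename_hint d)
    | none =>
      match other with
      | some o => (pvGet o "mime_type", pvGet o "link", filename_hint o)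
      | none => (none, none, "unknown")
  | f :: rest =>
    if !pvTruthy (pvGet f "link") then chooseLoop docx other rest
    else
      let mt := pvGet f "mime_type"
      if mt == some pdfMime then (mt, pvGet f "link", filename_hint f)
      else if mt == some docxMime && docx.isNone then chooseLoop (some f) other rest
      else if other.isNone then chooseLoop docx (some f) rest
      else chooseLoop docx other rest

def choose_best_file_py_alt (files : List (List (String × Option String))) : Option String × Option String × String :=
  chooseLoop none none files

-- ===== PRECONDITION & SPEC =====
def Spec_choose_best_file_py (files : List (List (String × Option String))) (out : Option String × Option String × String) : Prop := out = choose_best_file_py_alt files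
instance (files : List (List (String × Option String))) (out : Option String × Option String × String) : Decidable (Spec_choose_best_file_py files out) := by unfold Spec_choose_best_file_py; infer_instance

-- ===== CLAIM (what is proved, stated in full; the proofs are below) =====
def Claim_equal_choose_best_file_py : Prop := ∀ (files : List (List (String × Option String))), Dom_choose_best_file_py files → Spec_choose_best_file_py files (choose_best_file_py files)

-- ===== LEMMAS AND PROOFS =====

-- loop invariant: chooseLoop with candidate slots computes A's three-scan result,
-- with the slots pre-seeding the DOCX and fallback scans
theorem chooseLoop_eq (docx other : Option (List (String × Option String)))
    (files : List (List (String × Option String))) :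
    chooseLoop docx other files =
      match files.find? isPdf with
      | some p => (pvGet p "mime_type", pvGet p "link", filename_hint p)
      | none =>
        match docx.or (files.find? isDocx) with
        | some d => (pvGet d "mime_type", pvGet d "link", filename_hint d)
        | none =>
          match other.or (files.find? hasLink) with
          | some o => (pvGet o "mime_type", pvGet o "link", filename_hint o)
          | none => (none, none, "unknown") := by
  induction files generalizing docx other with
  | nil => cases docx <;> cases other <;> simp [chooseLoop]
  | cons f rest ih =>
    by_cases hl : pvTruthy (pvGet f "link")
    · by_cases hp : pvGet f "mime_type" == some pdfMime
      · have hp' : isPdf f = true := by simp [isPdf, hp, hl]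
        simp [chooseLoop, hl, hp, hp']
      · have hp' : isPdf f = false := by simp [isPdf]; intro h; simp [h] at hp
        by_cases hd : pvGet f "mime_type" == some docxMime
        · have hd' : isDocx f = true := by simp [isDocx, hd, hl]
          cases docx with
          | none =>
            simp only [chooseLoop, hl, hp, hd, Bool.not_true, Option.isNone_none,
              Bool.and_true, if_true, Bool.false_eq_true, if_false, ih]
            simp [List.find?_cons, hp', hd']
          | some d =>
            cases other with
            | none =>
              simp only [chooseLoop, hl, hp, hd, Option.isNone_some, Bool.and_false,
                Option.isNone_none, Bool.not_true, Bool.false_eq_true, if_false, if_true, ih]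
              simp [List.find?_cons, hp']
            | some o =>
              simp only [chooseLoop, hl, hp, hd, Option.isNone_some, Bool.and_false,
                Bool.not_true, Bool.false_eq_true, if_false, ih]
              simp [List.find?_cons, hp']
        · have hd' : isDocx f = false := by simp [isDocx]; intro h; simp [h] at hd
          have hk' : hasLink f = true := by simp [hasLink, hl]
          cases other with
          | none =>
            simp only [chooseLoop, hl, hp, hd, Bool.false_and, Option.isNone_none,
              Bool.not_true, Bool.false_eq_true, if_false, if_true, ih]
            simp [hp', hd', hk']
          | some o =>
            simp only [chooseLoop, hl, hp, hd, Bool.false_and, Option.isNone_some,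
              Bool.not_true, Bool.false_eq_true, if_false, ih]
            simp [hp', hd', hk']
    · have h1 : isPdf f = false := by simp [isPdf, hl]
      have h2 : isDocx f = false := by simp [isDocx, hl]
      have h3 : hasLink f = false := by simp [hasLink, hl]
      simp only [chooseLoop, hl, Bool.not_false, if_true, ih]
      simp [h1, h2, h3]

-- ===== VERDICT (by name: the statement is the Claim_ definition above) =====
theorem choose_best_file_py_spec : Claim_equal_choose_best_file_py := by
  intro files _
  unfold Spec_choose_best_file_py choose_best_file_py_alt choose_best_file_py
  rw [chooseLoop_eq]
  simp
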